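-- pv_equiv track=rewrite | github.com/Ellison-Lee/CA-assignment | CA-hw5/Evil Coordinate.py | check_path_safe
-- ===== SOURCE A (Python) =====
-- def check_path_safe(moves, mx, my):
--     """
--     检查给定的移动序列是否安全（不经过地雷）
--
--     Args:
--         moves: 移动指令字符串
--         mx, my: 地雷坐标
--
--     Returns:
--         bool: 如果路径安全返回True，否则返回False
--     """
--     x, y = 0, 0
--
--     # 如果地雷在起点，第一步必须避开
--     if mx == 0 and my == 0:
--         return False
--
--     for move in moves:
--         if move == 'U':
--             y += 1
--         elif move == 'D':
--             y -= 1
--         elif move == 'L':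
--             x -= 1
--         elif move == 'R':
--             x += 1
--
--         # 检查是否踩到地雷
--         if x == mx and y == my:
--             return False
--
--     return True
-- ===== SOURCE B (Python) =====
-- def check_path_safe(moves, mx, my):
--     if mx == 0 and my == 0:
--         return False
--     # build the whole path of visited positions, then one membership test
--     deltas = {'U': (0, 1), 'D': (0, -1), 'L': (-1, 0), 'R': (1, 0)}
--     path = [(0, 0)]
--     for c in moves:
--         dx, dy = deltas.get(c, (0, 0))
--         px, py = path[-1]
--         path.append((px + dx, py + dy))
--     return (mx, my) not in path[1:]
-- ===== Notes on version B (the rewrite author's own statement) =====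
-- stated objective: alternative
-- what changed: B translates each move into a (dx,dy) delta via a lookup table, accumulates the full list of visited positions, and decides safety with a single membership test, instead of A's per-move branch chain with early return after every step.
import Mathlib
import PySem

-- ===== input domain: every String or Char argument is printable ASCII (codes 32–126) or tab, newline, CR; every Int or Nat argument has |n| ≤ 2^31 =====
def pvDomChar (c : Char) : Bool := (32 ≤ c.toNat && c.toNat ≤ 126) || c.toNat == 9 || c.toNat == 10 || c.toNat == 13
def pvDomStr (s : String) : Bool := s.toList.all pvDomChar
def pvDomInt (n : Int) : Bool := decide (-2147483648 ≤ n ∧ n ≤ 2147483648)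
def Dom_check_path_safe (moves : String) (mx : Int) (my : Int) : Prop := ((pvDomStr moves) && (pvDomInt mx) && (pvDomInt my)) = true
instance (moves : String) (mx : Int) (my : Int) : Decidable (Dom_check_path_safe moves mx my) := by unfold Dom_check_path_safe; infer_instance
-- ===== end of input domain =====

-- B builds the whole visited-position list via a delta table and one membership test,
-- instead of A's per-move branch chain with early return (objective: alternative decomposition).

-- ===== PORT A =====
-- A's loop with early return: walk the chars, update (x,y) by the elif chain, stop at the mine.
def pvGoA : List Char → Int → Int → Int → Int → Bool
  | [], _, _, _, _ => true
  | c :: rest, x, y, mx, my =>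
    let xy : Int × Int :=
      if c = 'U' then (x, y + 1)
      else if c = 'D' then (x, y - 1)
      else if c = 'L' then (x - 1, y)
      else if c = 'R' then (x + 1, y)
      else (x, y)
    if xy.1 = mx ∧ xy.2 = my then false
    else pvGoA rest xy.1 xy.2 mx my

def check_path_safe (moves : String) (mx : Int) (my : Int) : Bool :=
  if mx = 0 ∧ my = 0 then false
  else pvGoA moves.toList 0 0 mx my

-- ===== PORT B =====
-- delta lookup table (deltas.get(c, (0,0)))
def pvDelta (c : Char) : Int × Int :=
  (PySem.Dict.ofList [('U', ((0:Int), (1:Int))), ('D', (0, -1)), ('L', (-1, 0)), ('R', (1, 0))]).getD c (0, 0)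

def check_path_safe_alt (moves : String) (mx : Int) (my : Int) : Bool :=
  if mx = 0 ∧ my = 0 then false
  else
    let path := moves.toList.foldl
      (fun (acc : List (Int × Int)) c =>
        let d := pvDelta c
        let p := acc.getLastD (0, 0)
        acc ++ [(p.1 + d.1, p.2 + d.2)])
      [((0:Int), (0:Int))]
    !((path.drop 1).contains (mx, my))

-- ===== PRECONDITION & SPEC =====
def Spec_check_path_safe (moves : String) (mx : Int) (my : Int) (out : Bool) : Prop := out = check_path_safe_alt moves mx my
instance (moves : String) (mx : Int) (my : Int) (out : Bool) : Decidable (Spec_check_path_safe moves mx my out) := by unfold Spec_check_path_safe; infer_instance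

-- ===== CLAIM (what is proved, stated in full; the proofs are below) =====
def Claim_equal_check_path_safe : Prop := ∀ (moves : String) (mx : Int) (my : Int), Dom_check_path_safe moves mx my → Spec_check_path_safe moves mx my (check_path_safe moves mx my)

-- ===== LEMMAS AND PROOFS =====

-- abstract path: positions visited after each char, starting from p
def pvPath (p : Int × Int) : List Char → List (Int × Int)
  | [] => []
  | c :: cs =>
    let q := (p.1 + (pvDelta c).1, p.2 + (pvDelta c).2)
    q :: pvPath q cs

-- the delta table evaluated: an if-chain over the four keys
theorem pvDelta_eq (c : Char) :
    pvDelta c = (if c = 'U' then ((0:Int), (1:Int))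
      else if c = 'D' then (0, -1)
      else if c = 'L' then (-1, 0)
      else if c = 'R' then (1, 0)
      else (0, 0)) := by
  have hd : (PySem.Dict.ofList [('U', ((0:Int), (1:Int))), ('D', (0, -1)), ('L', (-1, 0)), ('R', (1, 0))])
      = PySem.Dict.mk [('U', ((0:Int), (1:Int))), ('D', (0, -1)), ('L', (-1, 0)), ('R', (1, 0))] := by decide
  by_cases h1 : c = 'U'
  · subst h1; decide
  by_cases h2 : c = 'D'
  · subst h2; decide
  by_cases h3 : c = 'L'
  · subst h3; decide
  by_cases h4 : c = 'R'
  · subst h4; decide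
  rw [if_neg h1, if_neg h2, if_neg h3, if_neg h4]
  have hU : ('U' == c) = false := beq_eq_false_iff_ne.mpr (fun h => h1 h.symm)
  have hD : ('D' == c) = false := beq_eq_false_iff_ne.mpr (fun h => h2 h.symm)
  have hL : ('L' == c) = false := beq_eq_false_iff_ne.mpr (fun h => h3 h.symm)
  have hR : ('R' == c) = false := beq_eq_false_iff_ne.mpr (fun h => h4 h.symm)
  simp [pvDelta, hd, PySem.Dict.getD, hU, hD, hL, hR, PySem.Dict.get?]

-- A's elif-chain step equals adding the delta
theorem pvStep_eq (c : Char) (x y : Int) :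
    (if c = 'U' then (x, y + 1)
     else if c = 'D' then (x, y - 1)
     else if c = 'L' then (x - 1, y)
     else if c = 'R' then (x + 1, y)
     else (x, y)) = (x + (pvDelta c).1, y + (pvDelta c).2) := by
  rw [pvDelta_eq]
  split_ifs <;> simp <;> ring

-- A's early-return loop decides membership of the mine in the path
theorem pvGoA_eq_path (cs : List Char) (x y mx my : Int) :
    pvGoA cs x y mx my = !(decide ((mx, my) ∈ pvPath (x, y) cs)) := by
  induction cs generalizing x y with
  | nil => simp [pvGoA, pvPath]
  | cons c cs ih =>
    simp only [pvGoA, pvPath, pvStep_eq]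
    by_cases h : x + (pvDelta c).1 = mx ∧ y + (pvDelta c).2 = my
    · rw [if_pos h]
      obtain ⟨hx, hy⟩ := h
      subst hx; subst hy
      simp
    · rw [if_neg h, ih]
      have hne : ((mx, my) : Int × Int) ≠ (x + (pvDelta c).1, y + (pvDelta c).2) := by
        intro he
        exact h ⟨((Prod.mk.injEq _ _ _ _).mp he).1.symm, ((Prod.mk.injEq _ _ _ _).mp he).2.symm⟩
      simp [List.mem_cons, hne]

-- B's fold appends the path after the accumulator
theorem pvFold_path (cs : List Char) (acc : List (Int × Int)) (p : Int × Int) :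
    cs.foldl
      (fun (acc : List (Int × Int)) c =>
        let d := pvDelta c
        let q := acc.getLastD (0, 0)
        acc ++ [(q.1 + d.1, q.2 + d.2)])
      (acc ++ [p]) = acc ++ [p] ++ pvPath p cs := by
  induction cs generalizing acc p with
  | nil => simp [pvPath]
  | cons c cs ih =>
    simp only [List.foldl_cons, List.getLastD_concat]
    rw [ih (acc ++ [p])]
    simp [pvPath]

-- ===== VERDICT (by name: the statement is the Claim_ definition above) =====
theorem check_path_safe_spec : Claim_equal_check_path_safe := by
  intro moves mx my _
  unfold Spec_check_path_safe check_path_safe check_path_safe_alt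
  by_cases h0 : mx = 0 ∧ my = 0
  · simp [h0]
  · simp only [if_neg h0]
    have := pvFold_path moves.toList [] (0, 0)
    simp only [List.nil_append] at this
    rw [this, pvGoA_eq_path]
    simp
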